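-- pv_equiv track=rewrite | github.com/kiran-dewasi/K24-RELEASES | backend/services/item_normalizer.py | _units_compatible
-- ===== SOURCE A (Python) =====
-- from typing import Any, Dict, List, Optional, Tuple
--
-- _UNIT_GROUPS: List[set[str]] = [
--     # Weight
--     {"kg", "kgs", "kilogram", "kilograms", "g", "gm", "gms", "gram", "grams",
--      "mg", "milligram", "quintal", "qtl"},
--     # Volume
--     {"l", "ltr", "liter", "litre", "liters", "litres", "ml", "millilitre",
--      "milliliter", "kl"},
--     # Count
--     {"pcs", "pc", "nos", "no", "piece", "pieces", "unit", "units",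
--      "box", "boxes", "pack", "pkt", "packet", "packets", "bag", "bags",
--      "set", "sets", "doz", "dozen", "carton"},
--     # Length
--     {"m", "mtr", "meter", "metre", "cm", "mm", "ft", "feet", "inch"},
-- ]
--
-- def _normalize_unit(raw_unit: str) -> str:
--     """Canonicalize unit string: 'KGS' → 'kg', 'Pcs' → 'pcs'."""
--     return raw_unit.lower().strip().rstrip("s") if raw_unit else ""
--
-- def _units_compatible(a: str, b: str) -> bool:
--     """Return True if two units belong to the same unit group."""
--     na = _normalize_unit(a)
--     nb = _normalize_unit(b)
--     if na == nb:
--         return True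
--     for group in _UNIT_GROUPS:
--         norms = {g.rstrip("s") for g in group}
--         if na in norms and nb in norms:
--             return True
--     return False
-- ===== SOURCE B (Python) =====
-- from typing import Any, Dict, List, Optional, Tuple
--
-- # Flat lookup table written out once: each normalized unit (trailing 's' stripped)
-- # mapped to its group index (0 weight, 1 volume, 2 count, 3 length).
-- _UNIT_INDEX: Dict[str, int] = {
--     "g": 0, "gm": 0, "gram": 0, "kg": 0, "kilogram": 0, "mg": 0,
--     "milligram": 0, "qtl": 0, "quintal": 0,
--     "kl": 1, "l": 1, "liter": 1, "litre": 1, "ltr": 1,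
--     "milliliter": 1, "millilitre": 1, "ml": 1,
--     "bag": 2, "box": 2, "boxe": 2, "carton": 2, "doz": 2, "dozen": 2,
--     "no": 2, "pack": 2, "packet": 2, "pc": 2, "piece": 2, "pkt": 2,
--     "set": 2, "unit": 2,
--     "cm": 3, "feet": 3, "ft": 3, "inch": 3, "m": 3, "meter": 3,
--     "metre": 3, "mm": 3, "mtr": 3,
-- }
--
-- def _normalize_unit(raw_unit: str) -> str:
--     """Canonicalize unit string: 'KGS' → 'kg', 'Pcs' → 'pcs'."""
--     return raw_unit.lower().strip().rstrip("s") if raw_unit else ""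
--
-- def _units_compatible(a: str, b: str) -> bool:
--     """Return True if two units belong to the same unit group."""
--     na = _normalize_unit(a)
--     nb = _normalize_unit(b)
--     if na == nb:
--         return True
--     ga = _UNIT_INDEX.get(na)
--     gb = _UNIT_INDEX.get(nb)
--     return ga is not None and ga == gb
-- ===== Notes on version B (the rewrite author's own statement) =====
-- stated objective: idiomatic
-- what changed: Replaces the per-call loop over the unit groups (rebuilding each normalized set on every call) with one flat module-level table mapping each normalized unit to its group index, so the check is two lookups plus an equality test.
import Mathlib
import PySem

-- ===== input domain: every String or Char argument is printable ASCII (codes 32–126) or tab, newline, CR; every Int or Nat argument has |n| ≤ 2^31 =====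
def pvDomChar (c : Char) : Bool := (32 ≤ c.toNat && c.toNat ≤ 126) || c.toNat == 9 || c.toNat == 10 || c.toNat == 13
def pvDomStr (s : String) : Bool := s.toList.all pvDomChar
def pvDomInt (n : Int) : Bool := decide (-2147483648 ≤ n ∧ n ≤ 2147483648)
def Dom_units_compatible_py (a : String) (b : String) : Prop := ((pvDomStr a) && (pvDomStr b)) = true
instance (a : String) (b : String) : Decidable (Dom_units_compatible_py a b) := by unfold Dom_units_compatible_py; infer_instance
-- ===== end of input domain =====

-- B replaces A's per-call loop over the unit groups (which rebuilds each normalized set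
-- every call) with one flat literal table mapping each normalized unit to its group index:
-- the check becomes two lookups and an equality test.

-- s.rstrip("s"): drop every trailing 's'. Hand port (PySem has no rstrip-with-chars); exact
-- for this single-char strip set: reverse, drop leading 's', reverse back.
def rstripS (cs : List Char) : List Char := ((cs.reverse.dropWhile (fun c => c == 's')).reverse)

-- _normalize_unit: raw.lower().strip().rstrip("s") if raw else "" (on code points)
def normalizeUnit (s : String) : List Char :=
  if s.toList = [] then [] else rstripS (PySem.Chars.strip (PySem.Chars.lower s.toList))

-- ===== PORT A =====
def group0 : PySem.Set (List Char) := PySem.Set.ofList [['k', 'g'], ['k', 'g', 's'], ['k', 'i', 'l', 'o', 'g', 'r', 'a', 'm'], ['k', 'i', 'l', 'o', 'g', 'r', 'a', 'm', 's'], ['g'], ['g', 'm'], ['g', 'm', 's'], ['g', 'r', 'a', 'm'], ['g', 'r', 'a', 'm', 's'], ['m', 'g'], ['m', 'i', 'l', 'l', 'i', 'g', 'r', 'a', 'm'], ['q', 'u', 'i', 'n', 't', 'a', 'l'], ['q', 't', 'l']]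
def group1 : PySem.Set (List Char) := PySem.Set.ofList [['l'], ['l', 't', 'r'], ['l', 'i', 't', 'e', 'r'], ['l', 'i', 't', 'r', 'e'], ['l', 'i', 't', 'e', 'r', 's'], ['l', 'i', 't', 'r', 'e', 's'], ['m', 'l'], ['m', 'i', 'l', 'l', 'i', 'l', 'i', 't', 'r', 'e'], ['m', 'i', 'l', 'l', 'i', 'l', 'i', 't', 'e', 'r'], ['k', 'l']]
def group2 : PySem.Set (List Char) := PySem.Set.ofList [['p', 'c', 's'], ['p', 'c'], ['n', 'o', 's'], ['n', 'o'], ['p', 'i', 'e', 'c', 'e'], ['p', 'i', 'e', 'c', 'e', 's'], ['u', 'n', 'i', 't'], ['u', 'n', 'i', 't', 's'], ['b', 'o', 'x'], ['b', 'o', 'x', 'e', 's'], ['p', 'a', 'c', 'k'], ['p', 'k', 't'], ['p', 'a', 'c', 'k', 'e', 't'], ['p', 'a', 'c', 'k', 'e', 't', 's'], ['b', 'a', 'g'], ['b', 'a', 'g', 's'], ['s', 'e', 't'], ['s', 'e', 't', 's'], ['d', 'o', 'z'], ['d', 'o', 'z', 'e', 'n'], ['c', 'a', 'r', 't', 'o',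 'n']]
def group3 : PySem.Set (List Char) := PySem.Set.ofList [['m'], ['m', 't', 'r'], ['m', 'e', 't', 'e', 'r'], ['m', 'e', 't', 'r', 'e'], ['c', 'm'], ['m', 'm'], ['f', 't'], ['f', 'e', 'e', 't'], ['i', 'n', 'c', 'h']]
def unitGroups : List (PySem.Set (List Char)) := [group0, group1, group2, group3]

-- norms = {g.rstrip("s") for g in group}
def normSet (group : PySem.Set (List Char)) : PySem.Set (List Char) :=
  PySem.Set.ofList (group.map rstripS)

-- the 'for group in _UNIT_GROUPS' loop with its early return
def unitsLoop (na nb : List Char) : List (PySem.Set (List Char)) → Bool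
  | [] => false
  | group :: rest =>
    let norms := normSet group
    if PySem.Set.contains norms na && PySem.Set.contains norms nb then true
    else unitsLoop na nb rest

def units_compatible_py (a : String) (b : String) : Bool :=
  let na := normalizeUnit a
  let nb := normalizeUnit b
  if na == nb then true else unitsLoop na nb unitGroups

-- ===== PORT B =====
-- the literal dict _UNIT_INDEX of Source B, in its insertion order
def unitTable : PySem.Dict (List Char) Int :=
  PySem.Dict.ofList
  [("g".toList, 0),
   ("gm".toList, 0),
   ("gram".toList, 0),
   ("kg".toList, 0),
   ("kilogram".toList, 0),
   ("mg".toList, 0),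
   ("milligram".toList, 0),
   ("qtl".toList, 0),
   ("quintal".toList, 0),
   ("kl".toList, 1),
   ("l".toList, 1),
   ("liter".toList, 1),
   ("litre".toList, 1),
   ("ltr".toList, 1),
   ("milliliter".toList, 1),
   ("millilitre".toList, 1),
   ("ml".toList, 1),
   ("bag".toList, 2),
   ("box".toList, 2),
   ("boxe".toList, 2),
   ("carton".toList, 2),
   ("doz".toList, 2),
   ("dozen".toList, 2),
   ("no".toList, 2),
   ("pack".toList, 2),
   ("packet".toList, 2),
   ("pc".toList, 2),
   ("piece".toList, 2),
   ("pkt".toList, 2),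
   ("set".toList, 2),
   ("unit".toList, 2),
   ("cm".toList, 3),
   ("feet".toList, 3),
   ("ft".toList, 3),
   ("inch".toList, 3),
   ("m".toList, 3),
   ("meter".toList, 3),
   ("metre".toList, 3),
   ("mm".toList, 3),
   ("mtr".toList, 3)]

def units_compatible_py_alt (a : String) (b : String) : Bool :=
  let na := normalizeUnit a
  let nb := normalizeUnit b
  if na == nb then true
  else
    match unitTable.get? na, unitTable.get? nb with
    | some ga, some gb => ga == gb    -- ga is not None and ga == gb
    | _, _ => false

-- ===== PRECONDITION & SPEC =====
def Spec_units_compatible_py (a : String) (b : String) (out : Bool) : Prop := out = units_compatible_py_alt a b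
instance (a : String) (b : String) (out : Bool) : Decidable (Spec_units_compatible_py a b out) := by unfold Spec_units_compatible_py; infer_instance

-- ===== CLAIM (what is proved, stated in full; the proofs are below) =====
def Claim_equal_units_compatible_py : Prop := ∀ (a : String) (b : String), Dom_units_compatible_py a b → Spec_units_compatible_py a b (units_compatible_py a b)

-- ===== LEMMAS AND PROOFS =====

-- Every normalized unit of every group is a key of B's flat table.
set_option maxRecDepth 40000 in
lemma mem_keys_of_mem_normSet (g : PySem.Set (List Char)) (hg : g ∈ unitGroups)
    (z : List Char) (hz : z ∈ normSet g) : z ∈ unitTable.keys := by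
  fin_cases hg
  · have hall : (normSet group0).all (fun w => unitTable.keys.contains w) = true := by decide
    simpa using List.all_eq_true.mp hall z hz
  · have hall : (normSet group1).all (fun w => unitTable.keys.contains w) = true := by decide
    simpa using List.all_eq_true.mp hall z hz
  · have hall : (normSet group2).all (fun w => unitTable.keys.contains w) = true := by decide
    simpa using List.all_eq_true.mp hall z hz
  · have hall : (normSet group3).all (fun w => unitTable.keys.contains w) = true := by decide
    simpa using List.all_eq_true.mp hall z hz

-- Classification of an arbitrary normalized string: its table lookup and its membership
-- in each group's normalized set, jointly (the groups are pairwise disjoint after rstrip).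
set_option maxRecDepth 40000 in
lemma classify (x : List Char) :
    (unitTable.get? x = some 0 ∧ PySem.Set.contains (normSet group0) x = true ∧
      PySem.Set.contains (normSet group1) x = false ∧ PySem.Set.contains (normSet group2) x = false ∧
      PySem.Set.contains (normSet group3) x = false) ∨
    (unitTable.get? x = some 1 ∧ PySem.Set.contains (normSet group0) x = false ∧
      PySem.Set.contains (normSet group1) x = true ∧ PySem.Set.contains (normSet group2) x = false ∧
      PySem.Set.contains (normSet group3) x = false) ∨
    (unitTable.get? x = some 2 ∧ PySem.Set.contains (normSet group0) x = false ∧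
      PySem.Set.contains (normSet group1) x = false ∧ PySem.Set.contains (normSet group2) x = true ∧
      PySem.Set.contains (normSet group3) x = false) ∨
    (unitTable.get? x = some 3 ∧ PySem.Set.contains (normSet group0) x = false ∧
      PySem.Set.contains (normSet group1) x = false ∧ PySem.Set.contains (normSet group2) x = false ∧
      PySem.Set.contains (normSet group3) x = true) ∨
    (unitTable.get? x = none ∧ PySem.Set.contains (normSet group0) x = false ∧
      PySem.Set.contains (normSet group1) x = false ∧ PySem.Set.contains (normSet group2) x = false ∧
      PySem.Set.contains (normSet group3) x = false) := by
  by_cases hx : x ∈ unitTable.keys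
  · have hk : unitTable.keys = ["g", "gm", "gram", "kg", "kilogram", "mg", "milligram", "qtl", "quintal", "kl", "l", "liter", "litre", "ltr", "milliliter", "millilitre", "ml", "bag", "box", "boxe", "carton", "doz", "dozen", "no", "pack", "packet", "pc", "piece", "pkt", "set", "unit", "cm", "feet", "ft", "inch", "m", "meter", "metre", "mm", "mtr"].map String.toList := by decide
    rw [hk] at hx
    simp only [List.map_cons, List.map_nil, List.mem_cons, List.not_mem_nil, or_false] at hx
    rcases hx with rfl|rfl|rfl|rfl|rfl|rfl|rfl|rfl|rfl|rfl|rfl|rfl|rfl|rfl|rfl|rfl|rfl|rfl|rfl|rfl|rfl|rfl|rfl|rfl|rfl|rfl|rfl|rfl|rfl|rfl|rfl|rfl|rfl|rfl|rfl|rfl|rfl|rfl|rfl|rfl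
    all_goals decide
  · refine Or.inr (Or.inr (Or.inr (Or.inr ⟨?_, ?_, ?_, ?_, ?_⟩)))
    · exact (PySem.Dict.get?_eq_none_iff_not_mem_keys (d := unitTable) (k := x)).mpr hx
    · rw [Bool.eq_false_iff]
      intro hc
      exact hx (mem_keys_of_mem_normSet group0 (by simp [unitGroups]) x
        (by simpa [PySem.Set.contains] using hc))
    · rw [Bool.eq_false_iff]
      intro hc
      exact hx (mem_keys_of_mem_normSet group1 (by simp [unitGroups]) x
        (by simpa [PySem.Set.contains] using hc))
    · rw [Bool.eq_false_iff]
      intro hc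
      exact hx (mem_keys_of_mem_normSet group2 (by simp [unitGroups]) x
        (by simpa [PySem.Set.contains] using hc))
    · rw [Bool.eq_false_iff]
      intro hc
      exact hx (mem_keys_of_mem_normSet group3 (by simp [unitGroups]) x
        (by simpa [PySem.Set.contains] using hc))

-- Post-normalization core: A's group loop equals B's two-lookup comparison.
set_option maxRecDepth 40000 in
lemma core (x y : List Char) :
    unitsLoop x y unitGroups =
      (match unitTable.get? x, unitTable.get? y with
        | some ga, some gb => ga == gb
        | _, _ => false) := by
  rcases classify x with ⟨hx, h0x, h1x, h2x, h3x⟩ | ⟨hx, h0x, h1x, h2x, h3x⟩ |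
    ⟨hx, h0x, h1x, h2x, h3x⟩ | ⟨hx, h0x, h1x, h2x, h3x⟩ | ⟨hx, h0x, h1x, h2x, h3x⟩ <;>
  rcases classify y with ⟨hy, h0y, h1y, h2y, h3y⟩ | ⟨hy, h0y, h1y, h2y, h3y⟩ |
    ⟨hy, h0y, h1y, h2y, h3y⟩ | ⟨hy, h0y, h1y, h2y, h3y⟩ | ⟨hy, h0y, h1y, h2y, h3y⟩ <;>
  simp only [PySem.Set.contains] at h0x h1x h2x h3x h0y h1y h2y h3y <;>
  simp at h0x h1x h2x h3x h0y h1y h2y h3y <;>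
  simp [unitsLoop, unitGroups, hx, hy, h0x, h1x, h2x, h3x, h0y, h1y, h2y, h3y]

-- ===== VERDICT (by name: the statement is the Claim_ definition above) =====
set_option maxRecDepth 40000 in
theorem units_compatible_py_spec : Claim_equal_units_compatible_py := by
  intro a b _
  unfold Spec_units_compatible_py units_compatible_py units_compatible_py_alt
  by_cases h : normalizeUnit a == normalizeUnit b
  · simp [h]
  · simp only [h, Bool.false_eq_true, if_false]
    exact core _ _
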